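-- pv_equiv track=rewrite | github.com/yatink/aoc23 | christmas_py/day14.py | calculate_load
-- ===== SOURCE A (Python) =====
-- def calculate_load(grid: list[list[str]]) -> int:
--     num_rows = len(grid)
--     num_cols = len(grid[0])
--     columns = [[grid[r][c] for r in range(num_rows)] for c in range(num_cols)]
--     s = 0
--     for c in columns:
--         rocks = [idx for (idx, x) in enumerate(reversed(c), start=1) if x == 'O']
--         s += sum(rocks)
--     return s
-- ===== SOURCE B (Python) =====
-- def calculate_load(grid: list[list[str]]) -> int:
--     num_rows = len(grid)
--     num_cols = len(grid[0])
--     total = 0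
--     for r in range(num_rows):
--         row = grid[r]
--         for c in range(num_cols):
--             if row[c] == 'O':
--                 total += num_rows - r
--     return total
-- ===== Notes on version B (the rewrite author's own statement) =====
-- stated objective: faster
-- what changed: Replaces the transpose into column lists and the per-column reverse-enumerate/filter/sum with a single direct pass over the grid that adds num_rows - r for each 'O' cell; no transposed copy or intermediate lists are built.
import Mathlib
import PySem

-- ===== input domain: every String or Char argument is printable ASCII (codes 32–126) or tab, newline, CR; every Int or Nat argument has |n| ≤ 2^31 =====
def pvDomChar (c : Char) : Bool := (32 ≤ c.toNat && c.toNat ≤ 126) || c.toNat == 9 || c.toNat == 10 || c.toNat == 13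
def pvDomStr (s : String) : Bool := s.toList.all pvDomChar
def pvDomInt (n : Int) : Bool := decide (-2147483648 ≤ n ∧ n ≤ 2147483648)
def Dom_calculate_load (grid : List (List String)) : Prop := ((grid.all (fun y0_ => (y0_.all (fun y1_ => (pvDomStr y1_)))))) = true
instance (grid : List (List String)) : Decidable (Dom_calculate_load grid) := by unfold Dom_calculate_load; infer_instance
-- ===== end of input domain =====

-- B replaces A's transpose-then-per-column reverse-enumerate with one direct pass adding (num_rows - r) per 'O' cell (simpler, no intermediate lists).


-- ===== PORT A =====
def calculate_load (grid : List (List String)) : Int :=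
  let num_rows : Int := grid.length
  let num_cols : Int := ((PySem.List.pyGet? grid 0).getD []).length
  let columns := (PySem.List.pyRange 0 num_cols 1).map (fun c =>
    (PySem.List.pyRange 0 num_rows 1).map (fun r =>
      PySem.List.pyGetD (PySem.List.pyGetD grid r []) c ""))
  columns.foldl (fun s col =>
    s + (((PySem.List.enumerate col.reverse 1).filter (fun p => p.2 == "O")).map (·.1)).sum) 0

-- ===== PORT B =====
def calculate_load_alt (grid : List (List String)) : Int :=
  let num_rows : Int := grid.length
  let num_cols : Int := ((PySem.List.pyGet? grid 0).getD []).length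
  (PySem.List.pyRange 0 num_rows 1).foldl (fun total r =>
    let row := PySem.List.pyGetD grid r []
    (PySem.List.pyRange 0 num_cols 1).foldl (fun t c =>
      if PySem.List.pyGetD row c "" == "O" then t + (num_rows - r) else t) total) 0

-- ===== PRECONDITION & SPEC =====
-- Pre_ excludes exactly the IndexError inputs: the empty grid (grid[0]) and grids
-- with a row shorter than row 0 (grid[r][c] / row[c] raise in both A and B).
def Pre_calculate_load (grid : List (List String)) : Prop :=
  grid ≠ [] ∧ ∀ row ∈ grid, (grid.headD []).length ≤ row.length
instance (grid : List (List String)) : Decidable (Pre_calculate_load grid) := by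
  unfold Pre_calculate_load; infer_instance
def pvWitness_calculate_load : List (List String) := [["O", "."], ["#", "O"]]
def Spec_calculate_load (grid : List (List String)) (out : Int) : Prop := out = calculate_load_alt grid
instance (grid : List (List String)) (out : Int) : Decidable (Spec_calculate_load grid out) := by unfold Spec_calculate_load; infer_instance

-- ===== CLAIM (what is proved, stated in full; the proofs are below) =====
def Claim_equal_calculate_load : Prop := ∀ (grid : List (List String)), Dom_calculate_load grid → Pre_calculate_load grid → Spec_calculate_load grid (calculate_load grid)

-- ===== LEMMAS AND PROOFS =====

def G (s : Int) (l : List String) : Int :=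
  (((PySem.List.enumerate l s).filter (fun p => p.2 == "O")).map (·.1)).sum

lemma G_nil (s : Int) : G s [] = 0 := rfl

lemma G_cons (s : Int) (x : String) (xs : List String) :
    G s (x :: xs) = (if x == "O" then s else 0) + G (s+1) xs := by
  by_cases h : x == "O" <;> simp [G, PySem.List.enumerate_cons, List.filter, h]

lemma G_append_singleton (s : Int) (u : List String) (x : String) :
    G s (u ++ [x]) = G s u + (if x == "O" then s + u.length else 0) := by
  induction u generalizing s with
  | nil => by_cases h : x == "O" <;> simp [G_cons, G_nil, h]
  | cons y ys ih =>
    simp only [List.cons_append, G_cons, ih]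
    by_cases h : x == "O" <;> simp [h] <;> push_cast <;> ring

lemma colSum (l : List String) :
    G 1 l.reverse
      = ((List.range l.length).map
          (fun r => if l.getD r "" == "O" then ((l.length : Int) - r) else 0)).sum := by
  induction l with
  | nil => simp [G_nil]
  | cons x xs ih =>
    rw [List.reverse_cons, G_append_singleton, ih]
    show _ = ((List.range (xs.length + 1)).map _).sum
    rw [List.range_succ_eq_map]
    simp only [List.map_cons, List.map_map, List.sum_cons, List.length_cons,
      List.length_reverse, List.getD_cons_zero, List.getD_cons_succ, Function.comp]
    push_cast
    rw [add_comm]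
    congr 1
    · by_cases h : x == "O" <;> simp [h] <;> ring
    · refine congrArg List.sum (List.map_congr_left fun r _ => ?_)
      by_cases h : xs.getD r "" == "O" <;> simp [Function.comp, h] <;> ring


def cell (grid : List (List String)) (r c : Int) : Int :=
  if PySem.List.pyGetD (PySem.List.pyGetD grid r []) c "" == "O" then (grid.length : Int) - r else 0

lemma A_eq (grid : List (List String)) :
    calculate_load grid =
      ((List.range (((PySem.List.pyGet? grid 0).getD []).length)).map (fun (c : Nat) =>
        ((List.range grid.length).map (fun (r : Nat) => cell grid (r : Int) (c : Int))).sum)).sum := by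
  unfold calculate_load
  dsimp only
  rw [show (fun (s : Int) (col : List String) =>
        s + (((PySem.List.enumerate col.reverse 1).filter (fun p => p.2 == "O")).map (·.1)).sum)
      = (fun (s : Int) (col : List String) => s + G 1 col.reverse) from rfl]
  rw [PySem.List.foldl_add _ (fun col : List String => G 1 col.reverse) 0]
  simp only [zero_add, PySem.List.pyRange_one, List.map_map, Int.sub_zero,
    Int.toNat_natCast, Function.comp]
  refine congrArg List.sum (List.map_congr_left fun c hc => ?_)
  simp only [Function.comp_def]
  rw [colSum]
  simp only [List.length_map, List.length_range]
  refine congrArg List.sum (List.map_congr_left fun r hr => ?_)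
  rw [List.mem_range] at hr
  rw [PySem.List.getD_map_range _ _ _ _ hr, cell]

lemma B_eq (grid : List (List String)) :
    calculate_load_alt grid =
      ((List.range grid.length).map (fun (r : Nat) =>
        ((List.range (((PySem.List.pyGet? grid 0).getD []).length)).map
          (fun (c : Nat) => cell grid (r : Int) (c : Int))).sum)).sum := by
  unfold calculate_load_alt
  dsimp only
  have hfun : ∀ (rI : Int),
      (fun (t : Int) (c : Int) =>
        if PySem.List.pyGetD (PySem.List.pyGetD grid rI []) c "" == "O" then
          t + ((grid.length : Int) - rI) else t)
      = (fun (t : Int) (c : Int) =>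
          t + (if PySem.List.pyGetD (PySem.List.pyGetD grid rI []) c "" == "O" then
                (grid.length : Int) - rI else 0)) := by
    intro rI; funext t c; split <;> simp
  have step : (fun (total : Int) (rI : Int) =>
      (PySem.List.pyRange 0 ((((PySem.List.pyGet? grid 0).getD []).length : Nat) : Int)).foldl
        (fun t c =>
          if PySem.List.pyGetD (PySem.List.pyGetD grid rI []) c "" == "O" then
            t + ((grid.length : Int) - rI) else t) total)
      = (fun (total : Int) (rI : Int) =>
          total + ((PySem.List.pyRange 0 ((((PySem.List.pyGet? grid 0).getD []).length : Nat) : Int)).map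
            (fun c => if PySem.List.pyGetD (PySem.List.pyGetD grid rI []) c "" == "O" then
                (grid.length : Int) - rI else 0)).sum) := by
    funext total rI
    rw [hfun rI, PySem.List.foldl_add]
  rw [step, PySem.List.foldl_add]
  simp only [zero_add, PySem.List.pyRange_one, List.map_map, Int.sub_zero,
    Int.toNat_natCast, cell]
  simp only [Function.comp_def]

lemma sum_range_swap (m n : Nat) (f : Nat → Nat → Int) :
    ((List.range m).map (fun a => ((List.range n).map (fun b => f a b)).sum)).sum
      = ((List.range n).map (fun b => ((List.range m).map (fun a => f a b)).sum)).sum := by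
  have h : ∀ (k : Nat) (g : Nat → Int), ((List.range k).map g).sum = ∑ i ∈ Finset.range k, g i := by
    intro k g
    rfl
  simp only [h]
  exact Finset.sum_comm

theorem ab_eq (grid : List (List String)) : calculate_load grid = calculate_load_alt grid := by
  rw [A_eq, B_eq, sum_range_swap]

-- ===== VERDICT (by name: the statement is the Claim_ definition above) =====
theorem calculate_load_spec : Claim_equal_calculate_load := by
  intro grid _ _
  exact ab_eq grid
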